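-- pv_equiv track=rewrite | github.com/selfteaching/selfteaching-python-camp | exercises/1901110099/d09/mymodule/stats_word.py | stats_text_en
-- ===== SOURCE A (Python) =====
-- from collections import Counter
--
-- def stats_text_en(text, count):
--     elements=text.split()
--     words=[]
--     symbols=',.*-!'
--     for element in elements:
--         for symbol in symbols:
--             element=element.replace(symbol,'')
--         if len(element) and element.isascii():
--             words.append(element)
--     return Counter(words).most_common(count)
-- ===== SOURCE B (Python) =====
-- def stats_text_en(text, count):
--     counts = {}
--     for element in text.split():
--         cleaned = ''.join(ch for ch in element if ch not in ',.*-!')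
--         if cleaned and cleaned.isascii():
--             counts[cleaned] = counts.get(cleaned, 0) + 1
--     buckets = {}
--     for word, n in counts.items():
--         buckets.setdefault(n, []).append(word)
--     result = []
--     for c in range(max(counts.values(), default=0), 0, -1):
--         for word in buckets.get(c, []):
--             if len(result) >= count:
--                 return result
--             result.append((word, c))
--     return result
-- ===== Notes on version B (the rewrite author's own statement) =====
-- stated objective: alternative
-- what changed: B drops the sort/heap selection of Counter.most_common entirely: it counts words into a dict, groups words into frequency buckets, and emits results by sweeping frequencies from the maximum down (a counting-sort-style pass), stopping as soon as count results are collected; tokens are cleaned by a single character filter instead of five successive replace passes.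
import Mathlib
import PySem

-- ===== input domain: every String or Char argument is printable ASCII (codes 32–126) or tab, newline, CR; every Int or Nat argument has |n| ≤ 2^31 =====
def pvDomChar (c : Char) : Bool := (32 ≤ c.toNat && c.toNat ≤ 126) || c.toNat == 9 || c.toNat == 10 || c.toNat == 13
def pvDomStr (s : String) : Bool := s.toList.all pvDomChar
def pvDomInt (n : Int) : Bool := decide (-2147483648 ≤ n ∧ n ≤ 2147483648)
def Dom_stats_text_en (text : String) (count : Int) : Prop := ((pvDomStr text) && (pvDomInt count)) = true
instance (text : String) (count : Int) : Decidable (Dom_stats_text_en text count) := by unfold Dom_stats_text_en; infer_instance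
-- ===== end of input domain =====

-- B replaces Counter(...).most_common(count) (a sort/heap selection) by a counting-sort-style
-- frequency-bucket sweep with early exit, and the five replace passes by one character filter.

-- the 5 characters of the Python string ',.*-!'
def pvSymbols : List Char := [',', '.', '*', '-', '!']
-- str.isascii(): exact on all code points
def pvIsascii (s : String) : Bool := s.toList.all (fun c => c.toNat ≤ 127)

-- ===== PORT A =====
def stats_text_en (text : String) (count : Int) : List (String × Int) :=
  let elements := PySem.Str.split₀ text
  let words : List String := elements.foldl (fun words element =>
    let element := pvSymbols.foldl (fun e symbol => PySem.Str.replace e (String.ofList [symbol]) "") element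
    if PySem.Str.len element != 0 && pvIsascii element then words ++ [element] else words) []
  -- Counter(words).most_common(count), ported by hand (PySem has no most_common): for an int
  -- count it is heapq.nlargest(count, items, key=itemgetter(1)) = the stable sort of the items
  -- by count descending cut to the first `count` entries, and [] when count < 0 (exact there)
  let ranked := PySem.List.sorted (PySem.Dict.counter words).items (fun kv => kv.2) true
  if count < 0 then [] else PySem.List.slice ranked none (some count)

-- ===== PORT B =====
-- inner loop: 'for word in buckets.get(c, []): if len(result) >= count: return result; result.append((word, c))'
-- .inl = the loop body executed 'return result', .inr = the loop ran to its end
def pvTake (count : Int) (c : Int) : List String → List (String × Int) → Sum (List (String × Int)) (List (String × Int))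
  | [], acc => .inr acc
  | w :: ws, acc =>
      if (acc.length : Int) ≥ count then .inl acc
      else pvTake count c ws (acc ++ [(w, c)])

-- outer loop: 'for c in range(top, 0, -1): …'
def pvSweep (buckets : PySem.Dict Int (List String)) (count : Int) : List Int → List (String × Int) → List (String × Int)
  | [], acc => acc
  | c :: cs, acc =>
      match pvTake count c (buckets.getD c []) acc with
      | .inl res => res
      | .inr acc' => pvSweep buckets count cs acc'

def stats_text_en_alt (text : String) (count : Int) : List (String × Int) :=
  let counts : PySem.Dict String Int := (PySem.Str.split₀ text).foldl (fun counts element =>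
    let cleaned := String.ofList (element.toList.filter (fun ch => !pvSymbols.contains ch))
    if PySem.Str.len cleaned != 0 && pvIsascii cleaned then
      counts.insert cleaned (counts.getD cleaned 0 + 1)
    else counts) PySem.Dict.empty
  -- buckets.setdefault(n, []).append(word)  ==  buckets[n] = buckets.get(n, []) + [word]
  let buckets : PySem.Dict Int (List String) := counts.items.foldl
    (fun b kv => b.modify kv.2 [] (fun l => l ++ [kv.1])) PySem.Dict.empty
  let top := PySem.List.maxD counts.values (fun v => v) 0
  pvSweep buckets count (PySem.List.pyRange top 0 (-1)) []

-- ===== PRECONDITION & SPEC =====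
def Spec_stats_text_en (text : String) (count : Int) (out : List (String × Int)) : Prop := out = stats_text_en_alt text count
instance (text : String) (count : Int) (out : List (String × Int)) : Decidable (Spec_stats_text_en text count out) := by unfold Spec_stats_text_en; infer_instance

-- ===== CLAIM (what is proved, stated in full; the proofs are below) =====
def Claim_equal_stats_text_en : Prop := ∀ (text : String) (count : Int), Dom_stats_text_en text count → Spec_stats_text_en text count (stats_text_en text count)

-- ===== LEMMAS AND PROOFS =====

-- s.replace(c, '') for a single character c is a character filter (on the list side)
theorem pv_go_single (a : Char) : ∀ (fuel : Nat) (l acc : List Char), l.length ≤ fuel →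
    PySem.Chars.replace.go [a] [] fuel l acc = acc.reverse ++ l.filter (fun c => c != a) := by
  intro fuel
  induction fuel with
  | zero => intro l acc h; rw [List.length_eq_zero_iff.mp (Nat.le_zero.mp h)]; rfl
  | succ n ih =>
    intro l acc h
    cases l with
    | nil => rw [PySem.Chars.replace.go]; simp; omega
    | cons c t =>
      rw [PySem.Chars.replace.go]
      by_cases hc : c = a
      · subst hc
        simp [List.isPrefixOf, ih t acc (by simpa using h)]
      · have hp : [a].isPrefixOf (c :: t) = false := by
          simp [List.isPrefixOf]; exact fun h' => hc h'.symm
        rw [hp]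
        simp only [Bool.false_eq_true, if_false, ih t (c :: acc) (by simpa using h)]
        simp [hc]

theorem pv_replace_single (cs : List Char) (a : Char) :
    PySem.Chars.replace cs [a] [] = cs.filter (fun c => c != a) := by
  rw [PySem.Chars.replace]
  simp [pv_go_single a cs.length cs [] le_rfl]

-- A's five successive replace passes equal B's one character filter
theorem pv_clean_eq (s : String) :
    pvSymbols.foldl (fun e symbol => PySem.Str.replace e (String.ofList [symbol]) "") s
      = String.ofList (s.toList.filter (fun ch => !pvSymbols.contains ch)) := by
  have hstep : ∀ (t : String) (a : Char),
      PySem.Str.replace t (String.ofList [a]) "" = String.ofList (t.toList.filter (fun c => c != a)) := by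
    intro t a
    apply String.toList_injective
    simp [PySem.Str.toList_replace, pv_replace_single]
  simp only [pvSymbols, List.foldl_cons, List.foldl_nil, hstep]
  simp only [String.toList_ofList, List.filter_filter]
  congr 1
  apply List.filter_congr
  intro c _
  simp
  by_cases h1 : c = ',' <;> by_cases h2 : c = '.' <;> by_cases h3 : c = '*' <;>
    by_cases h4 : c = '-' <;> by_cases h5 : c = '!' <;> simp_all

-- the two counting pipelines build the same dict
theorem pv_counts_eq (elements : List String) :
    PySem.Dict.counter
        (elements.foldl (fun words element =>
          let element := pvSymbols.foldl (fun e symbol => PySem.Str.replace e (String.ofList [symbol]) "") element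
          if PySem.Str.len element != 0 && pvIsascii element then words ++ [element] else words) [])
      = elements.foldl (fun counts element =>
          let cleaned := String.ofList (element.toList.filter (fun ch => !pvSymbols.contains ch))
          if PySem.Str.len cleaned != 0 && pvIsascii cleaned then
            counts.insert cleaned (counts.getD cleaned 0 + 1)
          else counts) PySem.Dict.empty := by
  simp only [pv_clean_eq]
  rw [PySem.List.foldl_append_if, PySem.List.foldl_if_eq_foldl_filter]
  rw [← PySem.Dict.foldl_insert_getD_add_one_eq_counter, List.nil_append, List.foldl_map]

-- insertBy walks past a prefix it does not insert into
theorem pv_insertBy_append (before : String × Int → String × Int → Bool) (x : String × Int) :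
    ∀ (pre suf : List (String × Int)), (∀ y ∈ pre, before x y = false) →
    PySem.List.insertBy before x (pre ++ suf) = pre ++ PySem.List.insertBy before x suf := by
  intro pre
  induction pre with
  | nil => intro suf _; rfl
  | cons y ys ih =>
    intro suf h
    rw [List.cons_append, PySem.List.insertBy, h y (by simp), ih suf (fun z hz => h z (by simp [hz]))]
    simp

theorem pv_insertBy_front (before : String × Int → String × Int → Bool) (x : String × Int) :
    ∀ (l : List (String × Int)), (∀ y ∈ l, before x y = true) →
    PySem.List.insertBy before x l = x :: l := by
  intro l h
  cases l with
  | nil => rfl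
  | cons y ys => rw [PySem.List.insertBy, h y (by simp)]; simp

-- one insertion step of the stable descending sort lands at the end of its own frequency bucket
theorem pv_insert_buckets (x : String × Int) (g : Int → List (String × Int))
    (hg : ∀ c y, y ∈ g c → y.2 = c) :
    ∀ (cs : List Int), cs.Pairwise (· > ·) → x.2 ∈ cs →
    PySem.List.insertBy (fun a b => decide (b.2 < a.2)) x (cs.flatMap g)
      = cs.flatMap (fun c => g c ++ if x.2 = c then [x] else []) := by
  intro cs
  induction cs with
  | nil => intro _ h; simp at h
  | cons c cs' ih =>
    intro hpw hmem
    have hgt : ∀ c' ∈ cs', c' < c := (List.pairwise_cons.mp hpw).1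
    rw [List.flatMap_cons, List.flatMap_cons]
    by_cases hx : x.2 = c
    · have hpre : ∀ y ∈ g c, (fun a b => decide (b.2 < a.2)) x y = false := by
        intro y hy; simp [hg c y hy, hx]
      rw [pv_insertBy_append _ _ _ _ hpre]
      have hfront : ∀ y ∈ cs'.flatMap g, (fun a b => decide (b.2 < a.2)) x y = true := by
        intro y hy
        obtain ⟨c', hc', hyc'⟩ := List.mem_flatMap.mp hy
        simp [hg c' y hyc', hx]
        exact hgt c' hc'
      rw [pv_insertBy_front _ _ _ hfront]
      have hxnot : ∀ c' ∈ cs', ¬ (x.2 = c') := by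
        intro c' hc' he; rw [hx] at he; exact absurd (he ▸ hgt c' hc') (lt_irrefl c)
      have hrest : cs'.flatMap (fun c' => g c' ++ if x.2 = c' then [x] else []) = cs'.flatMap g := by
        apply List.flatMap_congr
        intro c' hc'
        simp [hxnot c' hc']
      rw [hrest, if_pos hx]
      simp
    · have hx' : x.2 ∈ cs' := by
        rcases List.mem_cons.mp hmem with h | h
        · exact absurd h hx
        · exact h
      have hpre : ∀ y ∈ g c, (fun a b => decide (b.2 < a.2)) x y = false := by
        intro y hy
        have : c > x.2 := hgt _ hx'
        simp [hg c y hy]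
        omega
      rw [pv_insertBy_append _ _ _ _ hpre, ih (List.pairwise_cons.mp hpw).2 hx', if_neg hx]
      simp

-- the stable descending sort by count IS the concatenation of the frequency buckets
theorem pv_sorted_eq_flatMap (cs : List Int) (hpw : cs.Pairwise (· > ·)) :
    ∀ (xs : List (String × Int)), (∀ kv ∈ xs, kv.2 ∈ cs) →
    PySem.List.sorted xs (fun kv => kv.2) true = cs.flatMap (fun c => xs.filter (fun kv => kv.2 = c)) := by
  intro xs
  induction xs using List.reverseRecOn with
  | nil => simp [PySem.List.sorted]
  | append_singleton ys x ih =>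
    intro h
    rw [PySem.List.sorted_rev_eq_foldl_insertBy, List.foldl_append, List.foldl_cons, List.foldl_nil,
        ← PySem.List.sorted_rev_eq_foldl_insertBy,
        ih (fun kv hkv => h kv (by simp [hkv]))]
    rw [pv_insert_buckets x (fun c => ys.filter (fun kv => kv.2 = c))
        (fun c y hy => by simpa using (List.mem_filter.mp hy).2) cs hpw (h x (by simp))]
    apply List.flatMap_congr
    intro c _
    simp [List.filter_append]
    by_cases hx : x.2 = c <;> simp [hx]

-- the inner loop appends this bucket's words until `count` results are collected
theorem pv_take_spec (count : Int) (c : Int) (hc : 0 ≤ count) :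
    ∀ (l : List String) (acc : List (String × Int)), (acc.length : Int) ≤ count →
    pvTake count c l acc =
      if (acc.length + l.length : Int) ≤ count then .inr (acc ++ l.map (fun w => (w, c)))
      else .inl (acc ++ (l.take (count.toNat - acc.length)).map (fun w => (w, c))) := by
  intro l
  induction l with
  | nil => intro acc h; simp [pvTake, h]
  | cons w ws ih =>
    intro acc h
    rw [pvTake]
    by_cases hstop : (acc.length : Int) ≥ count
    · have hacc : (acc.length : Int) = count := le_antisymm h hstop
      have hne : ¬((acc.length : Int) + ((w :: ws).length : Int) ≤ count) := by
        simp only [List.length_cons]; push_cast; omega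
      rw [if_pos hstop, if_neg hne]
      have h0 : count.toNat - acc.length = 0 := by omega
      simp [h0]
    · have hlt : (acc.length : Int) < count := lt_of_not_ge hstop
      rw [if_neg hstop, ih (acc ++ [(w, c)]) (by simp only [List.length_append, List.length_cons, List.length_nil]; push_cast; omega)]
      by_cases hfit : ((acc.length : Int) + ((w :: ws).length : Int) ≤ count)
      · have hfit' : (((acc ++ [(w, c)]).length : Int) + (ws.length : Int) ≤ count) := by
          simp only [List.length_append, List.length_cons, List.length_nil] at *; push_cast at *; omega
        rw [if_pos hfit', if_pos hfit]
        simp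
      · have hfit' : ¬(((acc ++ [(w, c)]).length : Int) + (ws.length : Int) ≤ count) := by
          simp only [List.length_cons] at hfit
          simp only [List.length_append, List.length_cons, List.length_nil]; push_cast at *; omega
        rw [if_neg hfit', if_neg hfit]
        have h1 : count.toNat - acc.length = (count.toNat - (acc ++ [(w, c)]).length) + 1 := by
          simp only [List.length_append, List.length_cons, List.length_nil]; omega
        rw [h1, List.take_succ_cons]
        simp

-- the outer loop with count ≥ 0: take `count` elements of the bucket concatenation
theorem pv_sweep_spec (b : PySem.Dict Int (List String)) (count : Int) (hc : 0 ≤ count) :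
    ∀ (cs : List Int) (acc : List (String × Int)), (acc.length : Int) ≤ count →
    pvSweep b count cs acc =
      acc ++ (cs.flatMap (fun c => (b.getD c []).map (fun w => (w, c)))).take (count.toNat - acc.length) := by
  intro cs
  induction cs with
  | nil => intro acc h; simp [pvSweep]
  | cons c cs' ih =>
    intro acc h
    rw [pvSweep, pv_take_spec count c hc _ acc h]
    by_cases hfit : ((acc.length : Int) + ((b.getD c []).length : Int) ≤ count)
    · rw [if_pos hfit]
      show pvSweep b count cs' (acc ++ (b.getD c []).map (fun w => (w, c))) = _
      rw [ih (acc ++ (b.getD c []).map (fun w => (w, c)))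
          (by simp only [List.length_append, List.length_map]; push_cast; omega)]
      rw [List.flatMap_cons, List.take_append]
      have hle : ((b.getD c []).map (fun w => (w, c))).length ≤ count.toNat - acc.length := by
        simp only [List.length_map]; omega
      rw [List.take_of_length_le hle]
      have harith : count.toNat - acc.length - ((b.getD c []).map (fun w => (w, c))).length
           = count.toNat - (acc ++ (b.getD c []).map (fun w => (w, c))).length := by
        simp only [List.length_map, List.length_append]; omega
      rw [harith, List.append_assoc]
    · rw [if_neg hfit]
      show acc ++ _ = _
      rw [List.flatMap_cons, List.take_append]
      have h2 : count.toNat - acc.length - ((b.getD c []).map (fun w => (w, c))).length = 0 := by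
        simp only [List.length_map]; omega
      rw [h2, List.take_zero, List.append_nil, ← List.map_take]

-- negative count: the first append attempt returns, so the result is []
theorem pv_take_neg (count : Int) (c : Int) (hc : count < 0) (l : List String) :
    pvTake count c l [] = if l.isEmpty then .inr [] else .inl [] := by
  cases l with
  | nil => rfl
  | cons w ws => rw [pvTake, if_pos (by simp; omega)]; rfl

theorem pv_sweep_neg (b : PySem.Dict Int (List String)) (count : Int) (hc : count < 0) :
    ∀ (cs : List Int), pvSweep b count cs [] = [] := by
  intro cs
  induction cs with
  | nil => rfl
  | cons c cs' ih =>
    rw [pvSweep, pv_take_neg count c hc]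
    by_cases hb : (b.getD c []).isEmpty <;> simp [hb, ih]

-- descending range: membership and strict order
theorem pv_mem_range_desc (a c : Int) : c ∈ PySem.List.pyRange a 0 (-1) ↔ 0 < c ∧ c ≤ a := by
  rw [PySem.List.pyRange_neg_one_eq_reverse, List.mem_reverse, PySem.List.mem_pyRange_one]
  omega

theorem pv_pairwise_desc (a : Int) : (PySem.List.pyRange a 0 (-1)).Pairwise (· > ·) := by
  rw [PySem.List.pyRange_neg_one_eq_reverse, List.pairwise_reverse]
  rw [PySem.List.pyRange_of_pos (0 + 1) (a + 1) Int.one_pos]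
  refine List.Pairwise.map _ (fun i j (hij : i < j) => ?_) List.pairwise_lt_range
  simp only [gt_iff_lt]
  omega

-- the bucket-building loop: bucket c holds the words of count c, in first-seen order
theorem pv_bucket (items : List (String × Int)) (c : Int) :
    (items.foldl (fun b kv => b.modify kv.2 [] (fun l => l ++ [kv.1])) PySem.Dict.empty).getD c []
      = (items.filter (fun kv => kv.2 = c)).map (fun kv => kv.1) := by
  have h := PySem.Dict.getD_foldl_modify_append (items.map (fun kv => (kv.2, kv.1))) PySem.Dict.empty c
  simp only [List.foldl_map, PySem.Dict.getD_empty, List.nil_append, List.filter_map,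
    Function.comp_def, List.map_map] at h
  rw [h]
  congr 1

-- counter values are positive counts
theorem pv_counter_items_pos (ws : List String) :
    ∀ kv ∈ (PySem.Dict.counter ws).items, 1 ≤ kv.2 := by
  intro kv hkv
  rw [PySem.Dict.items_counter] at hkv
  obtain ⟨k, hk, rfl⟩ := List.mem_map.mp hkv
  have hmem : k ∈ ws := (PySem.Set.mem_ofList ws k).mp hk
  have := List.count_pos_iff.mpr hmem
  omega

-- every stored count is bounded by max(counts.values(), default=0)
theorem pv_le_maxD (d : PySem.Dict String Int) :
    ∀ kv ∈ d.items, kv.2 ≤ PySem.List.maxD d.values (fun v => v) 0 := by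
  intro kv hkv
  have hv : kv.2 ∈ d.values := by
    simp only [PySem.Dict.values]
    exact List.mem_map.mpr ⟨kv, hkv, rfl⟩
  unfold PySem.List.maxD
  cases hm : PySem.List.max? d.values (fun v => v) with
  | none =>
    rw [PySem.List.max?_eq_none_iff] at hm
    rw [hm] at hv; simp at hv
  | some m =>
    simpa using PySem.List.max?_isMax hm kv.2 hv

-- A's truncated stable sort equals B's bucket sweep, over any word list
theorem pv_main (ws : List String) (count : Int) :
    (if count < 0 then [] else PySem.List.slice (PySem.List.sorted (PySem.Dict.counter ws).items (fun kv => kv.2) true) none (some count))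
    = pvSweep ((PySem.Dict.counter ws).items.foldl (fun b kv => b.modify kv.2 [] (fun l => l ++ [kv.1])) PySem.Dict.empty) count
        (PySem.List.pyRange (PySem.List.maxD (PySem.Dict.counter ws).values (fun v => v) 0) 0 (-1)) [] := by
  by_cases hneg : count < 0
  · rw [if_pos hneg, pv_sweep_neg _ count hneg]
  · have hc : 0 ≤ count := le_of_not_gt hneg
    rw [if_neg hneg, PySem.List.slice_to _ hc]
    have hcov : ∀ kv ∈ (PySem.Dict.counter ws).items,
        kv.2 ∈ PySem.List.pyRange (PySem.List.maxD (PySem.Dict.counter ws).values (fun v => v) 0) 0 (-1) := by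
      intro kv hkv
      rw [pv_mem_range_desc]
      exact ⟨by have := pv_counter_items_pos ws kv hkv; omega, pv_le_maxD _ kv hkv⟩
    rw [pv_sorted_eq_flatMap _ (pv_pairwise_desc _) _ hcov]
    rw [pv_sweep_spec _ count hc _ [] (by simp; omega)]
    have hb : ∀ c : Int, (((PySem.Dict.counter ws).items.filter (fun kv => kv.2 = c)).map (fun kv => kv.1)).map (fun w => (w, c))
        = (PySem.Dict.counter ws).items.filter (fun kv => kv.2 = c) := by
      intro c
      rw [List.map_map]
      have hcg : ∀ kv ∈ (PySem.Dict.counter ws).items.filter (fun kv => kv.2 = c),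
          ((fun w => (w, c)) ∘ fun kv : String × Int => kv.1) kv = id kv := by
        intro kv hkv
        have h2 : kv.2 = c := by simpa using (List.mem_filter.mp hkv).2
        simp [Function.comp, ← h2]
      rw [List.map_congr_left hcg, List.map_id]
    simp only [pv_bucket, hb, List.nil_append, List.length_nil, Nat.sub_zero]

-- ===== VERDICT (by name: the statement is the Claim_ definition above) =====
theorem stats_text_en_spec : Claim_equal_stats_text_en := by
  intro text count _
  show _ = _
  simp only [stats_text_en, stats_text_en_alt]
  rw [← pv_counts_eq]
  exact pv_main _ count
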